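-- pv_equiv track=rewrite | github.com/helloworldjay/Algorithm | Programmers/2020 겨울인턴십/3번.py | solution
-- ===== SOURCE A (Python) =====
-- def solution(v):
--     section = [0,0,0] # 무, 고구마, 감자 구역의 수
--     visited = [[0 for i in range(len(v))] for j in range(len(v))]
--     dx, dy = [-1,1,0,0], [0,0,-1,1]
--     for i in range(len(v)):
--         for j in range(len(v)):
--             if visited[i][j] == 0 : # 아직 방문을 하지 않았다면
--                 section[v[i][j]] += 1 # 해당 구역 개수 증가
--                 visiting = [(i,j)]
--                 while visiting:
--                     x, y = visiting.pop()
--                     visited[x][y] = 1 # 방문을 표시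
--                     for k in range(4):
--                         xx, yy = x+dx[k], y+dy[k]
--                         if 0<=xx<len(v) and 0<=yy<len(v) and visited[xx][yy] == 0 and v[i][j] == v[xx][yy]:
--                             visiting.append((xx,yy))
--     return section
-- ===== SOURCE B (Python) =====
-- def _region_min(v, n, i, j):
--     # component of (i,j) in the equal-value grid graph, found by frontier saturation;
--     # returns its lexicographically smallest cell
--     comp = {(i, j)}
--     frontier = [(i, j)]
--     while frontier:
--         nxt = []
--         for (x, y) in frontier:
--             for (xx, yy) in ((x - 1, y), (x + 1, y), (x, y - 1), (x, y + 1)):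
--                 if 0 <= xx < n and 0 <= yy < n and (xx, yy) not in comp and v[xx][yy] == v[i][j]:
--                     comp.add((xx, yy))
--                     nxt.append((xx, yy))
--         frontier = nxt
--     return min(comp)
--
--
-- def solution(v):
--     n = len(v)
--     section = [0, 0, 0]
--     for i in range(n):
--         for j in range(n):
--             if _region_min(v, n, i, j) == (i, j):
--                 section[v[i][j]] += 1
--     return section
-- ===== Notes on version B (the rewrite author's own statement) =====
-- stated objective: alternative
-- what changed: Replaces the single raster scan with a shared visited matrix and an explicit DFS stack (counting a region at each unvisited seed) by an independent per-cell membership test: for every cell a frontier-saturation (BFS-style) computation of its whole equal-value region with no shared state, counting the cell exactly when it is the lexicographically smallest cell of its region.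
import Mathlib
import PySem

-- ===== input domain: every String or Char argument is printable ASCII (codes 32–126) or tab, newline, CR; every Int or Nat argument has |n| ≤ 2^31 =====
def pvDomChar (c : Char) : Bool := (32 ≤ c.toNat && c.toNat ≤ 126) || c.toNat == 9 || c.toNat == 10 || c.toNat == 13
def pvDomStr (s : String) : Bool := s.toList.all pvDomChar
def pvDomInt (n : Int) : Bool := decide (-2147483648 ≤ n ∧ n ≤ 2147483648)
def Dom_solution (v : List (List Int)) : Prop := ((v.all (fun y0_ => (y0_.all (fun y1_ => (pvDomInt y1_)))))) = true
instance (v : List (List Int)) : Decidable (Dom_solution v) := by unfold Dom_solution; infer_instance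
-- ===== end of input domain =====

-- B replaces A's single raster scan (shared visited matrix + explicit DFS stack, counting a
-- region at each unvisited seed) by an independent per-cell frontier-saturation membership
-- test: a cell is counted exactly when it is the lexicographically smallest cell of its
-- equal-value region. Alternative decomposition of the same count; not faster.


-- ===== PORT A =====

-- m[x][y] for indices the program has already guarded by 0 <= x < len(v), 0 <= y < len(v)
-- (exact there; Pre_ additionally guarantees the rows are long enough)

def cellA (m : List (List Int)) (x y : Int) : Int := (m.getD x.toNat []).getD y.toNat 0

-- section[ix] += 1 (Python semantics: negative index from the end; where Python would
-- raise IndexError the input is outside Pre_ and s is returned unchanged)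

def pyBump (s : List Int) (ix : Int) : List Int :=
  match PySem.List.pyGet? s ix with
  | some a => PySem.List.pySetD s ix (a + 1)
  | none => s

def dxA : List Int := [-1, 1, 0, 0]

def dyA : List Int := [0, 0, -1, 1]

-- visited[x][y] = 1

def markA (vis : List (List Int)) (x y : Int) : List (List Int) :=
  vis.set x.toNat ((vis.getD x.toNat []).set y.toNat 1)

-- the `for k in range(4)` append loop of one pop, in append order

def pushesA (v : List (List Int)) (n : Nat) (si sj x y : Int) (vis : List (List Int)) :
    List (Int × Int) :=
  (List.range 4).foldl (fun acc k =>
    let xx := x + dxA.getD k 0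
    let yy := y + dyA.getD k 0
    if 0 ≤ xx ∧ xx < (n : Int) ∧ 0 ≤ yy ∧ yy < (n : Int) ∧ cellA vis xx yy = 0 ∧
        cellA v si sj = cellA v xx yy
    then acc ++ [(xx, yy)] else acc) []

-- the `while visiting:` loop; the Python list is kept reversed (head = Python's end, the
-- pop/append side), an exact simulation; the fuel only totalizes the recursion and is proved
-- sufficient below (the loop empties its stack within it)

def dfsA (v : List (List Int)) (n : Nat) (si sj : Int) :
    Nat → List (List Int) → List (Int × Int) → List (List Int)
  | _, vis, [] => vis
  | 0, vis, _ :: _ => vis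
  | fuel + 1, vis, (x, y) :: rest =>
      let vis' := markA vis x y
      dfsA v n si sj fuel vis' ((pushesA v n si sj x y vis').reverse ++ rest)

def solution (v : List (List Int)) : List Int :=
  let n := v.length
  ((List.range n).foldl (fun st (i : Nat) =>
      (List.range n).foldl (fun st (j : Nat) =>
        if cellA st.2 (i : Int) (j : Int) = 0 then
          (pyBump st.1 (cellA v (i : Int) (j : Int)),
           dfsA v n (i : Int) (j : Int) (5 ^ (n * n) + 1) st.2 [((i : Int), (j : Int))])
        else st) st)
    (([0, 0, 0] : List Int),
     (List.range n).map (fun _ => (List.range n).map (fun _ => (0 : Int))))).1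

-- ===== PORT B =====

-- Source B reads v[x][y] and does section[ix] += 1 exactly as A does: the ports share cellA/pyBump

def nbrsB (x y : Int) : List (Int × Int) := [(x - 1, y), (x + 1, y), (x, y - 1), (x, y + 1)]

-- one round of the frontier loop, returning (comp, nxt)

def expandB (v : List (List Int)) (n : Nat) (i j : Int) (frontier : List (Int × Int))
    (comp : PySem.Set (Int × Int)) : PySem.Set (Int × Int) × List (Int × Int) :=
  frontier.foldl (fun st p =>
    (nbrsB p.1 p.2).foldl (fun st2 q =>
      if 0 ≤ q.1 ∧ q.1 < (n : Int) ∧ 0 ≤ q.2 ∧ q.2 < (n : Int) ∧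
          PySem.Set.contains st2.1 q = false ∧ cellA v q.1 q.2 = cellA v i j
      then (PySem.Set.add st2.1 q, st2.2 ++ [q]) else st2) st) (comp, [])

-- `while frontier:`; fuel n*n+1 is proved sufficient (the component has at most n*n cells)

def growB (v : List (List Int)) (n : Nat) (i j : Int) :
    Nat → PySem.Set (Int × Int) → List (Int × Int) → PySem.Set (Int × Int)
  | _, comp, [] => comp
  | 0, comp, _ :: _ => comp
  | fuel + 1, comp, p :: fr =>
      let st := expandB v n i j (p :: fr) comp
      growB v n i j fuel st.1 st.2

-- min(comp): Python's min over a set of distinct pairs (a unique minimum, so the set's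
-- iteration order cannot matter); tuple comparison is lexicographic

def lexMinB (h : Int × Int) (t : List (Int × Int)) : Int × Int :=
  t.foldl (fun m p => if p.1 < m.1 ∨ (p.1 = m.1 ∧ p.2 < m.2) then p else m) h

-- the [] arm is unreachable: the component always contains (i, j)

def regionMinB (v : List (List Int)) (n : Nat) (i j : Int) : Int × Int :=
  match growB v n i j (n * n + 1) (PySem.Set.ofList [(i, j)]) [(i, j)] with
  | [] => (i, j)
  | h :: t => lexMinB h t

def solution_alt (v : List (List Int)) : List Int :=
  let n := v.length
  (List.range n).foldl (fun sec (i : Nat) =>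
    (List.range n).foldl (fun sec (j : Nat) =>
      if regionMinB v n (i : Int) (j : Int) = ((i : Int), (j : Int))
      then pyBump sec (cellA v (i : Int) (j : Int)) else sec) sec)
    ([0, 0, 0] : List Int)

-- ===== PRECONDITION & SPEC =====
-- Pre_ excludes exactly the inputs on which the Python A raises IndexError: a row of the
-- n×n square shorter than n = len(v), or a cell of the square holding a value outside -3..2
-- (each cell's value is also its region seed's value, so every out-of-range value is hit).
def Pre_solution (v : List (List Int)) : Prop :=
  (∀ r ∈ v, v.length ≤ r.length) ∧ (∀ r ∈ v, ∀ x ∈ r.take v.length, -3 ≤ x ∧ x ≤ 2)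
instance (v : List (List Int)) : Decidable (Pre_solution v) := by
  unfold Pre_solution; infer_instance

def pvWitness_solution : List (List Int) := [[0, 1], [2, 0]]

def Spec_solution (v : List (List Int)) (out : List Int) : Prop := out = solution_alt v
instance (v : List (List Int)) (out : List Int) : Decidable (Spec_solution v out) := by
  unfold Spec_solution; infer_instance

-- ===== CLAIM (what is proved, stated in full; the proofs are below) =====
def Claim_equal_solution : Prop :=
  ∀ (v : List (List Int)), Dom_solution v → Pre_solution v → Spec_solution v (solution v)

-- ===== LEMMAS AND PROOFS =====

def Sqn (n : Nat) (p : Int × Int) : Prop :=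
  0 ≤ p.1 ∧ p.1 < (n : Int) ∧ 0 ≤ p.2 ∧ p.2 < (n : Int)

def WFv (n : Nat) (vis : List (List Int)) : Prop :=
  vis.length = n ∧ ∀ r ∈ vis, r.length = n

theorem cellA_markA (n : Nat) (vis : List (List Int)) (hWF : WFv n vis) {x y a b : Int}
    (hx : Sqn n (x, y)) (ha : Sqn n (a, b)) :
    cellA (markA vis x y) a b = if a = x ∧ b = y then 1 else cellA vis a b := by
  obtain ⟨hlen, hrow⟩ := hWF
  obtain ⟨hx1, hx2, hy1, hy2⟩ := hx
  obtain ⟨ha1, ha2, hb1, hb2⟩ := ha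
  simp only at hx1 hx2 hy1 hy2 ha1 ha2 hb1 hb2
  have hxN : x.toNat < vis.length := by omega
  have haN : a.toNat < vis.length := by omega
  have hrowx : vis.getD x.toNat [] = vis[x.toNat] := List.getD_eq_getElem _ _ hxN
  have hxlen : (vis[x.toNat]).length = n := hrow _ (List.getElem_mem hxN)
  unfold cellA markA
  rw [hrowx]
  simp only [List.getD_eq_getElem?_getD, List.getElem?_set]
  by_cases hax : a = x
  · subst hax
    simp only [hxN, ite_true, Option.getD_some]
    by_cases hby : b = y
    · subst hby
      have hbl : b.toNat < (vis[a.toNat]).length := by rw [hxlen]; omega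
      simp [hbl]
    · have e2 : ¬ (y.toNat = b.toNat) := by omega
      simp [e2, hby, List.getElem?_eq_getElem hxN]
  · have e1 : ¬ (x.toNat = a.toNat) := by omega
    simp [e1, hax]

theorem WFv_markA (n : Nat) (vis : List (List Int)) (hWF : WFv n vis) {x y : Int}
    (hx : Sqn n (x, y)) : WFv n (markA vis x y) := by
  obtain ⟨hlen, hrow⟩ := hWF
  obtain ⟨hx1, hx2, hy1, hy2⟩ := hx
  simp only at hx1 hx2 hy1 hy2
  have hxN : x.toNat < vis.length := by omega
  constructor
  · simp [markA, hlen]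
  · intro r hr
    rcases List.mem_or_eq_of_mem_set hr with h | h
    · exact hrow _ h
    · subst h
      rw [List.length_set, List.getD_eq_getElem _ _ hxN]
      exact hrow _ (List.getElem_mem hxN)

noncomputable def sqFin (n : Nat) : Finset (Int × Int) :=
  (Finset.Icc (0 : Int) ((n : Int) - 1)) ×ˢ (Finset.Icc (0 : Int) ((n : Int) - 1))

theorem mem_sqFin (n : Nat) (p : Int × Int) : p ∈ sqFin n ↔ Sqn n p := by
  simp only [sqFin, Finset.mem_product, Finset.mem_Icc, Sqn]
  omega

theorem card_sqFin (n : Nat) : (sqFin n).card = n * n := by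
  simp only [sqFin, Finset.card_product, Int.card_Icc]
  have h : ((n : Int) - 1 + 1 - 0).toNat = n := by omega
  rw [h]

def EStep (v : List (List Int)) (p q : Int × Int) : Prop :=
  Sqn v.length p ∧ Sqn v.length q ∧
  (q = (p.1 - 1, p.2) ∨ q = (p.1 + 1, p.2) ∨ q = (p.1, p.2 - 1) ∨ q = (p.1, p.2 + 1)) ∧
  cellA v q.1 q.2 = cellA v p.1 p.2

def Conn (v : List (List Int)) : Int × Int → Int × Int → Prop :=
  Relation.ReflTransGen (EStep v)

theorem EStep_symm (v : List (List Int)) : Symmetric (EStep v) := by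
  rintro ⟨p1, p2⟩ ⟨q1, q2⟩ ⟨hp, hq, hoff, hval⟩
  refine ⟨hq, hp, ?_, hval.symm⟩
  simp only [Prod.mk.injEq] at hoff ⊢
  rcases hoff with ⟨h1, h2⟩ | ⟨h1, h2⟩ | ⟨h1, h2⟩ | ⟨h1, h2⟩
  · right; left; omega
  · left; omega
  · right; right; right; omega
  · right; right; left; omega

theorem Conn_symm (v : List (List Int)) {p q : Int × Int} (h : Conn v p q) : Conn v q p :=
  Relation.ReflTransGen.symmetric (EStep_symm v) h

theorem Conn_val (v : List (List Int)) {p q : Int × Int} (h : Conn v p q) :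
    cellA v q.1 q.2 = cellA v p.1 p.2 := by
  induction h with
  | refl => rfl
  | tail _h1 h2 ih => exact h2.2.2.2.trans ih

theorem Conn_sq (v : List (List Int)) {p q : Int × Int} (h : Conn v p q) :
    p = q ∨ Sqn v.length q := by
  induction h with
  | refl => exact Or.inl rfl
  | tail _h1 h2 _ih => exact Or.inr h2.2.1

theorem Conn_closure (v : List (List Int)) (S : Int × Int → Prop)
    (hS : ∀ p q, S p → EStep v p q → S q) {c p : Int × Int} (hc : S c)
    (h : Conn v c p) : S p := by
  induction h with
  | refl => exact hc
  | tail _h1 h2 ih => exact hS _ _ ih h2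

theorem pushesA_eq (v : List (List Int)) (n : Nat) (si sj x y : Int)
    (vis : List (List Int)) :
    pushesA v n si sj x y vis =
      [(x - 1, y), (x + 1, y), (x, y - 1), (x, y + 1)].filter
        (fun q => decide (0 ≤ q.1 ∧ q.1 < (n : Int) ∧ 0 ≤ q.2 ∧ q.2 < (n : Int) ∧
          cellA vis q.1 q.2 = 0 ∧ cellA v si sj = cellA v q.1 q.2)) := by
  have hbody : pushesA v n si sj x y vis =
      ((List.range 4).map (fun k => (x + dxA.getD k 0, y + dyA.getD k 0))).foldl
        (fun acc (q : Int × Int) =>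
          if 0 ≤ q.1 ∧ q.1 < (n : Int) ∧ 0 ≤ q.2 ∧ q.2 < (n : Int) ∧ cellA vis q.1 q.2 = 0 ∧
              cellA v si sj = cellA v q.1 q.2
          then acc ++ [q] else acc) [] := by
    rw [List.foldl_map]
    rfl
  have hmap : (List.range 4).map (fun k => (x + dxA.getD k 0, y + dyA.getD k 0)) =
      [(x - 1, y), (x + 1, y), (x, y - 1), (x, y + 1)] := by
    simp [List.range_succ, dxA, dyA, Prod.ext_iff]
    omega
  rw [hbody, hmap, PySem.List.foldl_ite_eq_foldl_filter]
  rw [show (fun acc (q : Int × Int) => acc ++ [q]) = (fun acc q => acc ++ [q]) from rfl]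
  rw [PySem.List.foldl_append_singleton]
  simp

def visP (vis : List (List Int)) (p : Int × Int) : Prop := cellA vis p.1 p.2 ≠ 0

noncomputable def unvisF (n : Nat) (vis : List (List Int)) : Finset (Int × Int) :=
  (sqFin n).filter (fun p => cellA vis p.1 p.2 = 0)

noncomputable def Mw (n : Nat) (vis : List (List Int)) (p : Int × Int) : Nat :=
  5 ^ ((unvisF n vis).card + (if cellA vis p.1 p.2 = 0 then 0 else 1))

noncomputable def Mpot (n : Nat) (vis : List (List Int)) (st : List (Int × Int)) : Nat :=
  (st.map (Mw n vis)).sum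

theorem cellA_markA' (n : Nat) (vis : List (List Int)) (hWF : WFv n vis) {x y : Int}
    {p : Int × Int} (hx : Sqn n (x, y)) (hp : Sqn n p) :
    cellA (markA vis x y) p.1 p.2 = if p = (x, y) then 1 else cellA vis p.1 p.2 := by
  have := cellA_markA n vis hWF (a := p.1) (b := p.2) hx hp
  rw [this]
  congr 1
  simp [Prod.ext_iff]

theorem unvisF_markA (n : Nat) (vis : List (List Int)) (hWF : WFv n vis) {x y : Int}
    (hx : Sqn n (x, y)) :
    unvisF n (markA vis x y) = (unvisF n vis).erase (x, y) := by
  ext p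
  simp only [unvisF, Finset.mem_filter, Finset.mem_erase, mem_sqFin]
  constructor
  · rintro ⟨hsq, hc⟩
    rw [cellA_markA' n vis hWF hx hsq] at hc
    by_cases hpe : p = (x, y)
    · simp [hpe] at hc
    · exact ⟨hpe, hsq, by simpa [hpe] using hc⟩
  · rintro ⟨hne, hsq, hc⟩
    refine ⟨hsq, ?_⟩
    rw [cellA_markA' n vis hWF hx hsq, if_neg hne]
    exact hc

theorem four_lt_five_pow (k : Nat) : 4 * 5 ^ k < 5 ^ (k + 1) := by
  have h : 0 < 5 ^ k := Nat.pow_pos (by norm_num)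
  rw [Nat.pow_succ]
  omega

theorem M_step (n : Nat) (v : List (List Int)) (si sj x y : Int) (vis : List (List Int))
    (hWF : WFv n vis) (hx : Sqn n (x, y)) (rest : List (Int × Int))
    (hrest : ∀ e ∈ rest, Sqn n e) :
    Mpot n (markA vis x y) ((pushesA v n si sj x y (markA vis x y)).reverse ++ rest) <
      Mpot n vis ((x, y) :: rest) := by
  set vis' := markA vis x y with hv'
  have hcell : ∀ p : Int × Int, Sqn n p →
      cellA vis' p.1 p.2 = if p = (x, y) then 1 else cellA vis p.1 p.2 :=
    fun p hp => cellA_markA' n vis hWF hx hp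
  have hU' : unvisF n vis' = (unvisF n vis).erase (x, y) := unvisF_markA n vis hWF hx
  have hpush : ∀ q ∈ pushesA v n si sj x y vis', Mw n vis' q = 5 ^ (unvisF n vis').card := by
    intro q hq
    rw [pushesA_eq] at hq
    simp only [List.mem_filter, decide_eq_true_eq] at hq
    simp [Mw, hq.2.2.2.2.2.1]
  have hlenP : (pushesA v n si sj x y vis').length ≤ 4 := by
    rw [pushesA_eq]
    exact le_trans (List.length_filter_le _ _) (by simp)
  have hsumP : ((pushesA v n si sj x y vis').reverse.map (Mw n vis')).sum ≤
      4 * 5 ^ (unvisF n vis').card := by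
    calc ((pushesA v n si sj x y vis').reverse.map (Mw n vis')).sum
        ≤ ((pushesA v n si sj x y vis').reverse.map
            (fun _ => 5 ^ (unvisF n vis').card)).sum := by
          apply List.sum_le_sum
          intro q hq
          rw [hpush q (by simpa using hq)]
      _ = (pushesA v n si sj x y vis').length * 5 ^ (unvisF n vis').card := by
          simp [List.map_const']
      _ ≤ 4 * 5 ^ (unvisF n vis').card := Nat.mul_le_mul_right _ hlenP
  have hMw_le : ∀ e ∈ rest, Mw n vis' e ≤ Mw n vis e := by
    intro e he
    have hsq := hrest e he
    rw [Mw, Mw, hcell e hsq]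
    by_cases hexy : e = (x, y)
    · subst hexy
      simp only [hU']
      by_cases hxy0 : cellA vis x y = 0
      · have hmem : ((x, y) : Int × Int) ∈ unvisF n vis := by
          simp [unvisF, mem_sqFin, hx, hxy0]
        have hpos : 1 ≤ (unvisF n vis).card := Finset.card_pos.mpr ⟨_, hmem⟩
        rw [Finset.card_erase_of_mem hmem]
        norm_num
        apply Nat.pow_le_pow_right (by norm_num)
        omega
      · have hmem : ((x, y) : Int × Int) ∉ unvisF n vis := by
          simp [unvisF, mem_sqFin, hxy0]
        rw [Finset.erase_eq_of_notMem hmem]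
        simp [hxy0]
    · simp only [if_neg hexy, hU']
      apply Nat.pow_le_pow_right (by norm_num)
      exact Nat.add_le_add_right Finset.card_erase_le _
  have hnewU : 4 * 5 ^ (unvisF n vis').card < Mw n vis (x, y) := by
    rw [Mw, hU']
    by_cases hxy0 : cellA vis x y = 0
    · have hmem : ((x, y) : Int × Int) ∈ unvisF n vis := by
        simp [unvisF, mem_sqFin, hx, hxy0]
      have hpos : 1 ≤ (unvisF n vis).card := Finset.card_pos.mpr ⟨_, hmem⟩
      rw [Finset.card_erase_of_mem hmem]
      simp only [hxy0]
      calc 4 * 5 ^ ((unvisF n vis).card - 1) < 5 ^ ((unvisF n vis).card - 1 + 1) :=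
            four_lt_five_pow _
        _ = 5 ^ (unvisF n vis).card := by congr 1; omega
    · have hmem : ((x, y) : Int × Int) ∉ unvisF n vis := by
        simp [unvisF, mem_sqFin, hxy0]
      rw [Finset.erase_eq_of_notMem hmem]
      simp only [hxy0, if_false]
      exact four_lt_five_pow _
  simp only [Mpot, List.map_append, List.sum_append, List.map_cons, List.sum_cons]
  calc ((pushesA v n si sj x y vis').reverse.map (Mw n vis')).sum + (rest.map (Mw n vis')).sum
      ≤ 4 * 5 ^ (unvisF n vis').card + (rest.map (Mw n vis)).sum := by
        apply Nat.add_le_add hsumP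
        apply List.sum_le_sum
        intro q hq
        exact hMw_le q (by simpa using hq)
    _ < Mw n vis (x, y) + (rest.map (Mw n vis)).sum := Nat.add_lt_add_right hnewU _

theorem getD_set_cases {α : Type} (l : List α) (i j : Nat) (e d : α) :
    (l.set i e).getD j d = l.getD j d ∨ (l.set i e).getD j d = e := by
  rw [List.getD_eq_getElem?_getD, List.getD_eq_getElem?_getD (l := l), List.getElem?_set]
  by_cases h : i = j
  · simp only [h]
    by_cases h2 : j < l.length
    · simp [h2]
    · rw [if_neg h2, List.getElem?_eq_none (by omega)]
      simp
  · simp [h]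

theorem cellA_markA_cases (vis : List (List Int)) (x y a b : Int) :
    cellA (markA vis x y) a b = cellA vis a b ∨ cellA (markA vis x y) a b = 1 := by
  unfold cellA markA
  by_cases h1 : x.toNat = a.toNat
  · rw [h1]
    rcases getD_set_cases vis a.toNat a.toNat ((vis.getD a.toNat []).set y.toNat 1) [] with
      h | h
    · rw [h]
      left
      rfl
    · rw [h]
      rcases getD_set_cases (vis.getD a.toNat []) y.toNat b.toNat 1 0 with h2 | h2
      · rw [h2]
        left
        rfl
      · rw [h2]
        right
        rfl
  · left
    congr 1
    conv_rhs => rw [List.getD_eq_getElem?_getD]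
    rw [List.getD_eq_getElem?_getD, List.getElem?_set, if_neg h1]

theorem visP_markA_mono (vis : List (List Int)) (x y : Int) (p : Int × Int)
    (h : visP vis p) : visP (markA vis x y) p := by
  unfold visP at h ⊢
  rcases cellA_markA_cases vis x y p.1 p.2 with hc | hc <;> rw [hc]
  · exact h
  · norm_num

theorem dfsA_run (v : List (List Int)) (si sj : Int) (V₀ : Int × Int → Prop)
    (hV₀closed : ∀ p q, V₀ p → EStep v p q → V₀ q) :
    ∀ (fuel : Nat) (vis : List (List Int)) (stack : List (Int × Int)),
      Mpot v.length vis stack < fuel →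
      WFv v.length vis →
      (∀ p, Sqn v.length p → V₀ p → visP vis p) →
      (∀ p, Sqn v.length p → visP vis p → V₀ p ∨ Conn v (si, sj) p) →
      (∀ e ∈ stack, Sqn v.length e ∧ Conn v (si, sj) e) →
      (∀ p, Sqn v.length p → visP vis p → ¬ V₀ p →
        ∀ q, EStep v p q → visP vis q ∨ q ∈ stack) →
      (visP vis (si, sj) ∨ (si, sj) ∈ stack) →
      WFv v.length (dfsA v v.length si sj fuel vis stack) ∧
      (∀ p, Sqn v.length p →
        (visP (dfsA v v.length si sj fuel vis stack) p ↔ (V₀ p ∨ Conn v (si, sj) p))) := by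
  intro fuel
  induction fuel with
  | zero =>
    intro vis stack hM _ _ _ _ _ _
    exact absurd hM (by omega)
  | succ f ih =>
    intro vis stack hM hWF hmono hsound hstk hclos hseed
    match stack with
    | [] =>
      refine ⟨hWF, fun p hp => ⟨fun hv => hsound p hp hv, fun hv => ?_⟩⟩
      rcases hv with hv | hv
      · exact hmono p hp hv
      · -- closure argument
        have hseedvis : visP vis (si, sj) := by
          rcases hseed with h | h
          · exact h
          · simp at h
        refine Conn_closure v (fun q => visP vis q) ?_ hseedvis hv
        intro a b ha hab
        by_cases hV : V₀ a
        · exact hmono b hab.2.1 (hV₀closed a b hV hab)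
        · rcases hclos a hab.1 ha hV b hab with h | h
          · exact h
          · simp at h
    | (x, y) :: rest =>
      have hxy := hstk (x, y) (by simp)
      have hsqxy := hxy.1
      set vis' := markA vis x y with hv'
      have hWF' : WFv v.length vis' := WFv_markA v.length vis hWF hsqxy
      have hcell : ∀ p : Int × Int, Sqn v.length p →
          cellA vis' p.1 p.2 = if p = (x, y) then 1 else cellA vis p.1 p.2 :=
        fun p hp => cellA_markA' v.length vis hWF hsqxy hp
      have hvisP' : ∀ p, Sqn v.length p → (visP vis' p ↔ (p = (x, y) ∨ visP vis p)) := by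
        intro p hp
        unfold visP
        rw [hcell p hp]
        by_cases hpe : p = (x, y) <;> simp [hpe]
      have hstep : dfsA v v.length si sj (f + 1) vis ((x, y) :: rest) =
          dfsA v v.length si sj f vis' ((pushesA v v.length si sj x y vis').reverse ++ rest) := by
        rfl
      rw [hstep]
      have hMlt : Mpot v.length vis' ((pushesA v v.length si sj x y vis').reverse ++ rest) <
          Mpot v.length vis ((x, y) :: rest) :=
        M_step v.length v si sj x y vis hWF hsqxy rest (fun e he => (hstk e (by simp [he])).1)
      -- membership in the new stack
      have hmemP : ∀ q, q ∈ pushesA v v.length si sj x y vis' ↔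
          ((q = (x - 1, y) ∨ q = (x + 1, y) ∨ q = (x, y - 1) ∨ q = (x, y + 1)) ∧
            Sqn v.length q ∧ cellA vis' q.1 q.2 = 0 ∧ cellA v si sj = cellA v q.1 q.2) := by
        intro q
        rw [pushesA_eq]
        simp only [List.mem_filter, decide_eq_true_eq, List.mem_cons,
          List.not_mem_nil, or_false]
        unfold Sqn
        tauto
      apply ih vis' ((pushesA v v.length si sj x y vis').reverse ++ rest)
        (by omega) hWF'
      -- mono
      · intro p hp hV
        exact (hvisP' p hp).mpr (Or.inr (hmono p hp hV))
      -- sound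
      · intro p hp hv
        rcases (hvisP' p hp).mp hv with h | h
        · subst h
          exact Or.inr hxy.2
        · exact hsound p hp h
      -- stack
      · intro e he
        rcases List.mem_append.mp he with h | h
        · rw [List.mem_reverse] at h
          rcases (hmemP e).mp h with ⟨hoff, hsq, _hunv, hval⟩
          have hE : EStep v (x, y) e := by
            refine ⟨hsqxy, hsq, ?_, ?_⟩
            · simpa using hoff
            · have h1 : cellA v x y = cellA v si sj := Conn_val v hxy.2
              rw [← hval, h1]
          exact ⟨hsq, hxy.2.tail hE⟩
        · exact hstk e (by simp [h])
      -- closure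
      · intro p hp hv hV q hE
        have hsqq : Sqn v.length q := hE.2.1
        by_cases hqv : visP vis' q
        · exact Or.inl hqv
        · rcases (hvisP' p hp).mp hv with hpe | hpold
          · -- p is the freshly marked cell: q gets pushed
            subst hpe
            right
            rw [List.mem_append, List.mem_reverse]
            left
            rw [hmemP q]
            refine ⟨?_, hsqq, ?_, ?_⟩
            · have := hE.2.2.1
              simpa using this
            · unfold visP at hqv
              exact not_not.mp hqv
            · have h1 : cellA v q.1 q.2 = cellA v x y := hE.2.2.2
              have h2 : cellA v x y = cellA v si sj := Conn_val v hxy.2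
              rw [h1, h2]
          · -- p was already visited before this pop
            rcases hclos p hp hpold hV q hE with h | h
            · exact Or.inl ((hvisP' q hsqq).mpr (Or.inr h))
            · rcases List.mem_cons.mp h with h | h
              · exact Or.inl ((hvisP' q hsqq).mpr (Or.inl h))
              · exact Or.inr (by simp [h])
      -- seed
      · rcases hseed with h | h
        · exact Or.inl (visP_markA_mono vis x y _ h)
        · rcases List.mem_cons.mp h with h | h
          · exact Or.inl ((hvisP' (si, sj) (h ▸ hsqxy)).mpr (Or.inl (by rw [h])))
          · exact Or.inr (by simp [h])

-- ===== B side =====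

def bStep (v : List (List Int)) (n : Nat) (i j : Int)
    (st2 : PySem.Set (Int × Int) × List (Int × Int)) (q : Int × Int) :
    PySem.Set (Int × Int) × List (Int × Int) :=
  if 0 ≤ q.1 ∧ q.1 < (n : Int) ∧ 0 ≤ q.2 ∧ q.2 < (n : Int) ∧
      PySem.Set.contains st2.1 q = false ∧ cellA v q.1 q.2 = cellA v i j
  then (PySem.Set.add st2.1 q, st2.2 ++ [q]) else st2

theorem expandB_eq (v : List (List Int)) (n : Nat) (i j : Int) (fr : List (Int × Int))
    (comp : PySem.Set (Int × Int)) :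
    expandB v n i j fr comp =
      fr.foldl (fun st p => (nbrsB p.1 p.2).foldl (bStep v n i j) st) (comp, []) := rfl

theorem add_of_not_contains (s : PySem.Set (Int × Int)) (q : Int × Int)
    (h : PySem.Set.contains s q = false) : PySem.Set.add s q = s ++ [q] := by
  simp only [PySem.Set.add, h]
  rfl

theorem foldl_ensure {σ α : Type _} (f : σ → α → σ) (Q : σ → Prop)
    (hmono : ∀ s a, Q s → Q (f s a)) {x : α} (hens : ∀ s, Q (f s x)) :
    ∀ (l : List α), x ∈ l → ∀ s, Q (l.foldl f s) := by
  intro l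
  induction l with
  | nil => intro hx; simp at hx
  | cons a t ih =>
    intro hx s
    rcases List.mem_cons.mp hx with h | h
    · subst h
      exact List.foldlRecOn t f (hens s) (fun b hb a' _ => hmono b a' hb)
    · exact ih h (f s a)

theorem expandB_spec (v : List (List Int)) (n : Nat) (i j : Int) (fr : List (Int × Int))
    (comp : PySem.Set (Int × Int)) (hnd : comp.Nodup) :
    (expandB v n i j fr comp).1 = comp ++ (expandB v n i j fr comp).2 ∧
    (expandB v n i j fr comp).1.Nodup ∧
    (∀ q ∈ (expandB v n i j fr comp).2,
      Sqn n q ∧ cellA v q.1 q.2 = cellA v i j ∧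
      ∃ p ∈ fr, q = (p.1 - 1, p.2) ∨ q = (p.1 + 1, p.2) ∨ q = (p.1, p.2 - 1) ∨
        q = (p.1, p.2 + 1)) := by
  rw [expandB_eq]
  apply List.foldlRecOn (motive := fun st : PySem.Set (Int × Int) × List (Int × Int) =>
    st.1 = comp ++ st.2 ∧ st.1.Nodup ∧
    (∀ q ∈ st.2, Sqn n q ∧ cellA v q.1 q.2 = cellA v i j ∧
      ∃ p ∈ fr, q = (p.1 - 1, p.2) ∨ q = (p.1 + 1, p.2) ∨ q = (p.1, p.2 - 1) ∨
        q = (p.1, p.2 + 1)))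
  · exact ⟨by simp, hnd, by simp⟩
  · intro st hst p hp
    apply List.foldlRecOn (motive := fun st : PySem.Set (Int × Int) × List (Int × Int) =>
      st.1 = comp ++ st.2 ∧ st.1.Nodup ∧
      (∀ q ∈ st.2, Sqn n q ∧ cellA v q.1 q.2 = cellA v i j ∧
        ∃ p ∈ fr, q = (p.1 - 1, p.2) ∨ q = (p.1 + 1, p.2) ∨ q = (p.1, p.2 - 1) ∨
          q = (p.1, p.2 + 1)))
    · exact hst
    · intro st2 hst2 q hq
      unfold bStep
      split_ifs with hc
      · refine ⟨?_, ?_, ?_⟩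
        · simp only
          rw [add_of_not_contains _ _ hc.2.2.2.2.1, hst2.1, List.append_assoc]
        · exact PySem.Set.nodup_add _ _ hst2.2.1
        · intro q' hq'
          simp only at hq'
          rcases List.mem_append.mp hq' with h | h
          · exact hst2.2.2 q' h
          · have hqq : q' = q := by simpa using h
            subst hqq
            refine ⟨⟨hc.1, hc.2.1, hc.2.2.1, hc.2.2.2.1⟩, hc.2.2.2.2.2, p, hp, ?_⟩
            simpa [nbrsB, Prod.ext_iff] using hq
      · exact hst2

theorem expandB_closure (v : List (List Int)) (n : Nat) (i j : Int) (fr : List (Int × Int))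
    (comp : PySem.Set (Int × Int)) (p q : Int × Int) (hp : p ∈ fr)
    (hshape : q = (p.1 - 1, p.2) ∨ q = (p.1 + 1, p.2) ∨ q = (p.1, p.2 - 1) ∨ q = (p.1, p.2 + 1))
    (hsq : Sqn n q) (hval : cellA v q.1 q.2 = cellA v i j) :
    q ∈ (expandB v n i j fr comp).1 := by
  rw [expandB_eq]
  have hmono_b : ∀ (st : PySem.Set (Int × Int) × List (Int × Int)) (a : Int × Int),
      q ∈ st.1 → q ∈ (bStep v n i j st a).1 := by
    intro st a hqs
    unfold bStep
    split_ifs with hc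
    · simp only
      exact (PySem.Set.mem_add _ _ _).mpr (Or.inl hqs)
    · exact hqs
  have hens_b : ∀ (st : PySem.Set (Int × Int) × List (Int × Int)),
      q ∈ (bStep v n i j st q).1 := by
    intro st
    unfold bStep
    by_cases hcont : PySem.Set.contains st.1 q = true
    · rw [if_neg (fun hcond => by rw [hcond.2.2.2.2.1] at hcont; exact Bool.false_ne_true hcont)]
      exact (PySem.Set.contains_iff _ _).mp hcont
    · rw [if_pos ⟨hsq.1, hsq.2.1, hsq.2.2.1, hsq.2.2.2,
        Bool.not_eq_true _ ▸ hcont, hval⟩]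
      exact (PySem.Set.mem_add _ _ _).mpr (Or.inr rfl)
  have hq_mem : q ∈ nbrsB p.1 p.2 := by
    simp only [nbrsB, List.mem_cons, List.not_mem_nil, or_false]
    tauto
  have hmono_inner : ∀ (s : PySem.Set (Int × Int) × List (Int × Int)) (a : Int × Int),
      q ∈ s.1 → q ∈ ((nbrsB a.1 a.2).foldl (bStep v n i j) s).1 := by
    intro s a hqs
    exact List.foldlRecOn (motive := fun st : PySem.Set (Int × Int) × List (Int × Int) =>
      q ∈ st.1) _ _ hqs (fun b hb a' _ => hmono_b b a' hb)
  have hens_inner : ∀ s : PySem.Set (Int × Int) × List (Int × Int),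
      q ∈ ((nbrsB p.1 p.2).foldl (bStep v n i j) s).1 :=
    fun s => foldl_ensure (bStep v n i j) (fun st => q ∈ st.1) hmono_b hens_b _ hq_mem s
  exact foldl_ensure (fun st p => (nbrsB p.1 p.2).foldl (bStep v n i j) st)
    (fun st => q ∈ st.1) hmono_inner hens_inner fr hp (comp, [])

theorem nodup_sq_length_le (n : Nat) (l : List (Int × Int)) (hnd : l.Nodup)
    (hsq : ∀ q ∈ l, Sqn n q) : l.length ≤ n * n := by
  have h1 : l.toFinset.card = l.length := List.toFinset_card_of_nodup hnd
  have h2 : l.toFinset ⊆ sqFin n := by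
    intro q hq
    rw [mem_sqFin]
    exact hsq q (List.mem_toFinset.mp hq)
  calc l.length = l.toFinset.card := h1.symm
    _ ≤ (sqFin n).card := Finset.card_le_card h2
    _ = n * n := card_sqFin n

theorem comp_closed_iff (v : List (List Int)) (i j : Int) (comp : List (Int × Int))
    (hseed : (i, j) ∈ comp)
    (hsound : ∀ q ∈ comp, Sqn v.length q ∧ Conn v (i, j) q)
    (hclos : ∀ p ∈ comp, ∀ q, EStep v p q → q ∈ comp) :
    ∀ q, q ∈ comp ↔ Conn v (i, j) q := by
  intro q
  constructor
  · intro hq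
    exact (hsound q hq).2
  · intro hq
    exact Conn_closure v (fun w => w ∈ comp) (fun a b ha hab => hclos a ha b hab) hseed hq

theorem growB_run (v : List (List Int)) (i j : Int) :
    ∀ (fuel : Nat) (comp : PySem.Set (Int × Int)) (frontier : List (Int × Int)),
      comp.Nodup →
      v.length * v.length + 1 ≤ fuel + comp.length →
      (i, j) ∈ comp →
      (∀ q ∈ comp, Sqn v.length q ∧ Conn v (i, j) q) →
      (∀ p ∈ frontier, p ∈ comp) →
      (∀ p ∈ comp, p ∉ frontier → ∀ q, EStep v p q → q ∈ comp) →
      ∀ q, (q ∈ growB v v.length i j fuel comp frontier ↔ Conn v (i, j) q) := by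
  intro fuel
  induction fuel with
  | zero =>
    intro comp frontier hnd hfuel hseed hsound hfr hclos q
    match frontier with
    | [] =>
      exact comp_closed_iff v i j comp hseed hsound
        (fun p hp q' hq' => hclos p hp (by simp) q' hq') q
    | p :: fr =>
      exfalso
      have := nodup_sq_length_le v.length comp hnd (fun w hw => (hsound w hw).1)
      omega
  | succ f ih =>
    intro comp frontier hnd hfuel hseed hsound hfr hclos q
    match frontier with
    | [] =>
      exact comp_closed_iff v i j comp hseed hsound
        (fun p hp q' hq' => hclos p hp (by simp) q' hq') q
    | p :: fr =>
      have hstep : growB v v.length i j (f + 1) comp (p :: fr) =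
          growB v v.length i j f (expandB v v.length i j (p :: fr) comp).1
            (expandB v v.length i j (p :: fr) comp).2 := rfl
      rw [hstep]
      obtain ⟨hE1, hE2, hE3⟩ := expandB_spec v v.length i j (p :: fr) comp hnd
      set c := (expandB v v.length i j (p :: fr) comp).1 with hc
      set nx := (expandB v v.length i j (p :: fr) comp).2 with hnx
      have hsub : ∀ w ∈ comp, w ∈ c := by
        intro w hw
        rw [hE1]
        exact List.mem_append.mpr (Or.inl hw)
      have hsound' : ∀ w ∈ c, Sqn v.length w ∧ Conn v (i, j) w := by
        intro w hw
        rw [hE1] at hw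
        rcases List.mem_append.mp hw with h | h
        · exact hsound w h
        · obtain ⟨hsq, hval, p', hp', hshape⟩ := hE3 w h
          have hp'c := hsound p' (hfr p' hp')
          have hE : EStep v p' w := by
            refine ⟨hp'c.1, hsq, hshape, ?_⟩
            have h1 : cellA v p'.1 p'.2 = cellA v i j := Conn_val v hp'c.2
            rw [hval, h1]
          exact ⟨hsq, hp'c.2.tail hE⟩
      have hclos' : ∀ p' ∈ c, p' ∉ nx → ∀ w, EStep v p' w → w ∈ c := by
        intro p' hp' hp'nx w hw
        have hp'comp : p' ∈ comp := by
          rw [hE1] at hp'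
          rcases List.mem_append.mp hp' with h | h
          · exact h
          · exact absurd h hp'nx
        by_cases hfr' : p' ∈ p :: fr
        · apply expandB_closure v v.length i j (p :: fr) comp p' w hfr' hw.2.2.1 hw.2.1
          have h1 : cellA v w.1 w.2 = cellA v p'.1 p'.2 := hw.2.2.2
          have h2 : cellA v p'.1 p'.2 = cellA v i j := Conn_val v (hsound p' hp'comp).2
          rw [h1, h2]
        · exact hsub w (hclos p' hp'comp hfr' w hw)
      by_cases hnx0 : nx = []
      · have hgoal : growB v v.length i j f c nx = c := by rw [hnx0]; cases f <;> rfl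
        rw [hgoal]
        refine comp_closed_iff v i j c (hsub _ hseed) hsound' ?_ q
        intro p' hp' w hw
        exact hclos' p' hp' (by rw [hnx0]; simp) w hw
      · apply ih c nx hE2 ?_ (hsub _ hseed) hsound'
          (fun p' hp' => by rw [hE1]; exact List.mem_append.mpr (Or.inr hp'))
          hclos'
        rw [hE1, List.length_append]
        have : 1 ≤ nx.length := List.length_pos_of_ne_nil hnx0
        omega

def lexLt (p q : Int × Int) : Prop := p.1 < q.1 ∨ (p.1 = q.1 ∧ p.2 < q.2)

theorem lexMinB_spec (t : List (Int × Int)) :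
    ∀ h : Int × Int, lexMinB h t ∈ h :: t ∧ ∀ p ∈ h :: t, ¬ lexLt p (lexMinB h t) := by
  induction t with
  | nil =>
    intro h
    refine ⟨by simp [lexMinB], ?_⟩
    intro p hp
    simp at hp
    subst hp
    simp [lexMinB, lexLt]
  | cons a t ih =>
    intro h
    have hstep : lexMinB h (a :: t) =
        lexMinB (if a.1 < h.1 ∨ (a.1 = h.1 ∧ a.2 < h.2) then a else h) t := rfl
    rcases ih (if a.1 < h.1 ∨ (a.1 = h.1 ∧ a.2 < h.2) then a else h) with ⟨hmem, hmin⟩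
    rw [hstep]
    constructor
    · rcases List.mem_cons.mp hmem with hm | hm
      · rw [hm]
        split_ifs with hcond
        · simp
        · simp
      · simp [hm]
    · intro p hp
      set m := lexMinB (if a.1 < h.1 ∨ (a.1 = h.1 ∧ a.2 < h.2) then a else h) t with hmdef
      have hminh : ¬ lexLt (if a.1 < h.1 ∨ (a.1 = h.1 ∧ a.2 < h.2) then a else h) m :=
        hmin _ (by simp)
      rcases List.mem_cons.mp hp with hph | hpat
      · subst hph
        split_ifs at hminh with hcond
        · unfold lexLt at hminh ⊢
          omega
        · exact hminh
      · rcases List.mem_cons.mp hpat with hpa | hpt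
        · subst hpa
          split_ifs at hminh with hcond
          · exact hminh
          · unfold lexLt at hminh ⊢
            simp only [not_or, not_and, not_lt] at hcond
            omega
        · exact hmin p (by simp [hpt])

theorem regionMinB_spec (v : List (List Int)) (i j : Int) (hij : Sqn v.length (i, j)) :
    Conn v (i, j) (regionMinB v v.length i j) ∧
    ∀ q, Conn v (i, j) q → ¬ lexLt q (regionMinB v v.length i j) := by
  have hiff := growB_run v i j (v.length * v.length + 1) (PySem.Set.ofList [(i, j)])
    [(i, j)]
    (PySem.Set.nodup_ofList _)
    (by omega)
    ((PySem.Set.mem_ofList _ _).mpr (by simp))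
    (by
      intro q hq
      have : q = (i, j) := by simpa using (PySem.Set.mem_ofList _ _).mp hq
      subst this
      exact ⟨hij, Relation.ReflTransGen.refl⟩)
    (by
      intro p hp
      have : p = (i, j) := by simpa using hp
      subst this
      exact (PySem.Set.mem_ofList _ _).mpr (by simp))
    (by
      intro p hp hnp
      have : p = (i, j) := by simpa using (PySem.Set.mem_ofList _ _).mp hp
      exact absurd (by simp [this]) hnp)
  have hne : growB v v.length i j (v.length * v.length + 1) (PySem.Set.ofList [(i, j)])
      [(i, j)] ≠ [] := by
    intro hemp
    have := (hiff (i, j)).mpr Relation.ReflTransGen.refl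
    rw [hemp] at this
    simp at this
  obtain ⟨h, t, hcomp⟩ := List.exists_cons_of_ne_nil hne
  have hreg : regionMinB v v.length i j = lexMinB h t := by
    unfold regionMinB
    rw [hcomp]
  obtain ⟨hmem, hmin⟩ := lexMinB_spec t h
  rw [hreg]
  constructor
  · exact (hiff _).mp (by rw [hcomp]; exact hmem)
  · intro q hq
    exact hmin q (by rw [← hcomp]; exact (hiff q).mpr hq)

def pairsL (n : Nat) : List (Nat × Nat) :=
  (List.range n).flatMap (fun i => (List.range n).map (fun j => (i, j)))

def iota (c : Nat × Nat) : Int × Int := ((c.1 : Int), (c.2 : Int))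

theorem mem_pairsL (n : Nat) (c : Nat × Nat) : c ∈ pairsL n ↔ c.1 < n ∧ c.2 < n := by
  simp only [pairsL, List.mem_flatMap, List.mem_map, List.mem_range]
  constructor
  · rintro ⟨a, ha, b, hb, rfl⟩
    exact ⟨ha, hb⟩
  · rintro ⟨h1, h2⟩
    exact ⟨c.1, h1, c.2, h2, rfl⟩

theorem pairwise_pairsL (n : Nat) :
    (pairsL n).Pairwise (fun a b => lexLt (iota a) (iota b)) := by
  unfold pairsL
  rw [List.pairwise_flatMap]
  constructor
  · intro a _
    rw [List.pairwise_map]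
    exact (List.pairwise_lt_range).imp (fun {b c} h => Or.inr ⟨rfl, by show ((b:Int) < (c:Int)); exact_mod_cast h⟩)
  · apply (List.pairwise_lt_range).imp
    intro a b hab x hx y hy
    rw [List.mem_map] at hx hy
    obtain ⟨jx, _, rfl⟩ := hx
    obtain ⟨jy, _, rfl⟩ := hy
    exact Or.inl (by show ((a:Int) < (b:Int)); exact_mod_cast hab)

theorem mem_prefix_iff (n : Nat) (D L : List (Nat × Nat)) (c0 : Nat × Nat)
    (hsplit : D ++ c0 :: L = pairsL n) :
    ∀ c, c ∈ D ↔ (c.1 < n ∧ c.2 < n ∧ lexLt (iota c) (iota c0)) := by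
  have hpw := pairwise_pairsL n
  rw [← hsplit] at hpw
  rw [List.pairwise_append] at hpw
  obtain ⟨_, hCL, hcross⟩ := hpw
  intro c
  constructor
  · intro hc
    have hmem : c ∈ pairsL n := by
      rw [← hsplit]
      exact List.mem_append.mpr (Or.inl hc)
    have hb := (mem_pairsL n c).mp hmem
    exact ⟨hb.1, hb.2, hcross c hc c0 (by simp)⟩
  · rintro ⟨h1, h2, hlex⟩
    have hmem : c ∈ D ++ c0 :: L := by
      rw [hsplit]
      exact (mem_pairsL n c).mpr ⟨h1, h2⟩
    rcases List.mem_append.mp hmem with h | h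
    · exact h
    · rcases List.mem_cons.mp h with h | h
      · exfalso
        rw [h] at hlex
        unfold lexLt at hlex
        omega
      · exfalso
        have := (List.pairwise_cons.mp hCL).1 c h
        unfold lexLt at hlex this
        omega

theorem seed_iff (v : List (List Int)) (D L : List (Nat × Nat)) (i j : Nat)
    (hsplit : D ++ (i, j) :: L = pairsL v.length) :
    ((¬ ∃ c ∈ D, Conn v (iota c) (iota (i, j))) ↔
      regionMinB v v.length (i : Int) (j : Int) = ((i : Int), (j : Int))) := by
  have hij_mem : ((i, j) : Nat × Nat) ∈ pairsL v.length := by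
    rw [← hsplit]
    exact List.mem_append.mpr (Or.inr (by simp))
  have hb := (mem_pairsL _ _).mp hij_mem
  have hsq : Sqn v.length ((i : Int), (j : Int)) :=
    ⟨by show (0:Int) ≤ (i:Int); positivity,
     by show ((i:Nat):Int) < ((v.length:Nat):Int); exact_mod_cast hb.1,
     by show (0:Int) ≤ (j:Int); positivity,
     by show ((j:Nat):Int) < ((v.length:Nat):Int); exact_mod_cast hb.2⟩
  have hDiff := mem_prefix_iff v.length D L (i, j) hsplit
  obtain ⟨hconn_m, hmin⟩ := regionMinB_spec v (i : Int) (j : Int) hsq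
  set m := regionMinB v v.length (i : Int) (j : Int) with hm
  constructor
  · intro hno
    by_contra hne
    have hsqm : Sqn v.length m := by
      rcases Conn_sq v hconn_m with h | h
      · exact absurd h.symm hne
      · exact h
    have hmin_ij : ¬ lexLt ((i : Int), (j : Int)) m := hmin _ Relation.ReflTransGen.refl
    set c : Nat × Nat := (m.1.toNat, m.2.toNat) with hc
    have hiotac : iota c = m := by
      unfold iota
      obtain ⟨h1, _, h3, _⟩ := hsqm
      simp only [hc]
      ext <;> simp <;> omega
    apply hno
    refine ⟨c, ?_, ?_⟩
    · rw [hDiff c]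
      obtain ⟨h1, h2, h3, h4⟩ := hsqm
      refine ⟨by simp [hc]; omega, by simp [hc]; omega, ?_⟩
      rw [hiotac]
      unfold lexLt at hmin_ij ⊢
      simp only [iota]
      have hne' : m.1 ≠ (i : Int) ∨ m.2 ≠ (j : Int) := by
        by_contra hcon
        rw [not_or, not_not, not_not] at hcon
        exact hne (Prod.ext hcon.1 hcon.2)
      rcases hne' with h | h <;> omega
    · rw [hiotac]
      exact Conn_symm v hconn_m
  · intro hm_eq
    rintro ⟨c, hcD, hconn⟩
    have hlex := ((hDiff c).mp hcD).2.2
    have : ¬ lexLt (iota c) m := hmin _ (Conn_symm v hconn)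
    rw [hm_eq] at this
    exact this hlex

theorem nested_eq {σ : Type} (n : Nat) (g : σ → Nat → Nat → σ) (init : σ) :
    (List.range n).foldl (fun st i => (List.range n).foldl (fun st j => g st i j) st) init =
      (pairsL n).foldl (fun st c => g st c.1 c.2) init := by
  unfold pairsL
  rw [List.foldl_flatMap]
  simp only [List.foldl_map]

theorem getD_zeros (l : List Int) (hl : ∀ x ∈ l, x = (0 : Int)) (k : Nat) :
    l.getD k 0 = 0 := by
  rw [List.getD_eq_getElem?_getD]
  rcases h : l[k]? with _ | x
  · rfl
  · exact hl x (List.mem_of_getElem? h)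

theorem cellA_init (n : Nat) (a b : Int) :
    cellA ((List.range n).map (fun _ => (List.range n).map (fun _ => (0 : Int)))) a b = 0 := by
  unfold cellA
  apply getD_zeros
  intro x hx
  have hrow : ((List.range n).map (fun _ => (List.range n).map (fun _ => (0 : Int)))).getD
      a.toNat [] = [] ∨ ∀ y ∈ ((List.range n).map
        (fun _ => (List.range n).map (fun _ => (0 : Int)))).getD a.toNat [],
        y = (0 : Int) := by
    rw [List.getD_eq_getElem?_getD]
    rcases h : ((List.range n).map (fun _ => (List.range n).map (fun _ => (0 : Int))))[a.toNat]?
      with _ | r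
    · left
      rfl
    · right
      simp only [Option.getD_some]
      have := List.mem_of_getElem? h
      rw [List.mem_map] at this
      obtain ⟨_, _, hr⟩ := this
      intro y hy
      rw [← hr, List.mem_map] at hy
      obtain ⟨_, _, hy⟩ := hy
      exact hy.symm
  rcases hrow with h | h
  · rw [h] at hx
    simp at hx
  · exact h x hx

theorem WFv_init (n : Nat) :
    WFv n ((List.range n).map (fun _ => (List.range n).map (fun _ => (0 : Int)))) := by
  constructor
  · simp
  · intro r hr
    rw [List.mem_map] at hr
    obtain ⟨_, _, hr⟩ := hr
    rw [← hr]
    simp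

theorem sq_of_mem_pairsL (n : Nat) (c : Nat × Nat) (hc : c ∈ pairsL n) :
    Sqn n (iota c) := by
  have hb := (mem_pairsL n c).mp hc
  exact ⟨by show (0:Int) ≤ (c.1:Int); positivity,
    by show ((c.1:Nat):Int) < ((n:Nat):Int); exact_mod_cast hb.1,
    by show (0:Int) ≤ (c.2:Int); positivity,
    by show ((c.2:Nat):Int) < ((n:Nat):Int); exact_mod_cast hb.2⟩

theorem loop_combined (v : List (List Int)) :
    ∀ (L D : List (Nat × Nat)) (sec : List Int) (vis : List (List Int)),
      D ++ L = pairsL v.length →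
      WFv v.length vis →
      (∀ p, Sqn v.length p → (visP vis p ↔ ∃ c ∈ D, Conn v (iota c) p)) →
      (L.foldl (fun st (c : Nat × Nat) =>
        if cellA st.2 (c.1 : Int) (c.2 : Int) = 0 then
          (pyBump st.1 (cellA v (c.1 : Int) (c.2 : Int)),
           dfsA v v.length (c.1 : Int) (c.2 : Int) (5 ^ (v.length * v.length) + 1) st.2
             [((c.1 : Int), (c.2 : Int))])
        else st) (sec, vis)).1 =
      L.foldl (fun sec (c : Nat × Nat) =>
        if regionMinB v v.length (c.1 : Int) (c.2 : Int) = ((c.1 : Int), (c.2 : Int))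
        then pyBump sec (cellA v (c.1 : Int) (c.2 : Int)) else sec) sec := by
  intro L
  induction L with
  | nil =>
    intro D sec vis _ _ _
    rfl
  | cons c L' ih =>
    intro D sec vis hsplit hWF hinv
    obtain ⟨i, j⟩ := c
    have hsqc : Sqn v.length (iota (i, j)) := by
      apply sq_of_mem_pairsL v.length (i, j)
      rw [← hsplit]
      exact List.mem_append.mpr (Or.inr (by simp))
    have hseed_iff := seed_iff v D L' i j hsplit
    have hsplit' : (D ++ [(i, j)]) ++ L' = pairsL v.length := by
      rw [List.append_assoc]
      exact hsplit
    have hAcond : (cellA vis (i : Int) (j : Int) = 0) ↔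
        ¬ ∃ c' ∈ D, Conn v (iota c') (iota (i, j)) := by
      rw [← hinv (iota (i, j)) hsqc]
      unfold visP
      constructor
      · intro h hn
        exact hn h
      · intro h
        by_contra hne
        exact h hne
    simp only [List.foldl_cons]
    by_cases hcond : cellA vis (i : Int) (j : Int) = 0
    · -- seed: both sides bump, A runs the DFS
      have hB : regionMinB v v.length (i : Int) (j : Int) = ((i : Int), (j : Int)) :=
        hseed_iff.mp (hAcond.mp hcond)
      rw [if_pos hcond, if_pos hB]
      set V₀ : Int × Int → Prop := fun p => ∃ c' ∈ D, Conn v (iota c') p with hV₀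
      have hrun := dfsA_run v (i : Int) (j : Int) V₀
        (by
          rintro p q ⟨c', hc', hconn⟩ hE
          exact ⟨c', hc', hconn.tail hE⟩)
        (5 ^ (v.length * v.length) + 1) vis [((i : Int), (j : Int))]
        (by
          -- potential bound
          unfold Mpot Mw
          simp [hcond]
          have hUle : (unvisF v.length vis).card ≤ v.length * v.length := by
            calc (unvisF v.length vis).card ≤ (sqFin v.length).card :=
              Finset.card_filter_le _ _
              _ = v.length * v.length := card_sqFin _
          have hple := Nat.pow_le_pow_right (show 1 ≤ 5 by norm_num) hUle
          omega)
        hWF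
        (fun p hp hV => (hinv p hp).mpr hV)
        (fun p hp hv => Or.inl ((hinv p hp).mp hv))
        (by
          intro e he
          have : e = ((i : Int), (j : Int)) := by simpa using he
          subst this
          exact ⟨hsqc, Relation.ReflTransGen.refl⟩)
        (by
          intro p hp hv hV _ _
          exact absurd ((hinv p hp).mp hv) hV)
        (Or.inr (by simp))
      apply ih (D ++ [(i, j)]) _ _ hsplit' hrun.1
      intro p hp
      rw [hrun.2 p hp]
      constructor
      · rintro (⟨c', hc', hconn⟩ | hconn)
        · exact ⟨c', by simp [hc'], hconn⟩
        · exact ⟨(i, j), by simp, hconn⟩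
      · rintro ⟨c', hc', hconn⟩
        rcases List.mem_append.mp hc' with h | h
        · exact Or.inl ⟨c', h, hconn⟩
        · have : c' = (i, j) := by simpa using h
          subst this
          exact Or.inr hconn
    · -- not a seed: both sides keep their state
      have hB : ¬ regionMinB v v.length (i : Int) (j : Int) = ((i : Int), (j : Int)) := by
        intro hB
        exact hcond (hAcond.mpr (hseed_iff.mpr hB))
      rw [if_neg hcond, if_neg hB]
      apply ih (D ++ [(i, j)]) _ _ hsplit' hWF
      intro p hp
      rw [hinv p hp]
      constructor
      · rintro ⟨c', hc', hconn⟩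
        exact ⟨c', by simp [hc'], hconn⟩
      · rintro ⟨c', hc', hconn⟩
        rcases List.mem_append.mp hc' with h | h
        · exact ⟨c', h, hconn⟩
        · have hceq : c' = (i, j) := by simpa using h
          subst hceq
          have hvisc : visP vis (iota (i, j)) := hcond
          obtain ⟨c₀, hc₀, hconn₀⟩ := (hinv (iota (i, j)) hsqc).mp hvisc
          exact ⟨c₀, hc₀, hconn₀.trans hconn⟩

theorem solution_eq_alt (v : List (List Int)) : solution v = solution_alt v := by
  simp only [solution, solution_alt]
  rw [nested_eq v.length
    (fun (st : List Int × List (List Int)) (i j : Nat) =>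
      if cellA st.2 (i : Int) (j : Int) = 0 then
        (pyBump st.1 (cellA v (i : Int) (j : Int)),
         dfsA v v.length (i : Int) (j : Int) (5 ^ (v.length * v.length) + 1) st.2
           [((i : Int), (j : Int))])
      else st)]
  rw [nested_eq v.length
    (fun (sec : List Int) (i j : Nat) =>
      if regionMinB v v.length (i : Int) (j : Int) = ((i : Int), (j : Int))
      then pyBump sec (cellA v (i : Int) (j : Int)) else sec)]
  apply loop_combined v (pairsL v.length) [] [0, 0, 0]
    ((List.range v.length).map (fun _ => (List.range v.length).map (fun _ => (0 : Int))))
    (by simp) (WFv_init v.length)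
  intro p _
  unfold visP
  rw [cellA_init]
  simp

-- ===== VERDICT (by name: the statement is the Claim_ definition above) =====
theorem solution_spec : Claim_equal_solution := by
  intro v _hDom _hPre
  unfold Spec_solution
  exact solution_eq_alt v
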